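-- pv_equiv track=rewrite | github.com/stefareed/sql-fol | sql_fol/sql_to_fol.py | _make_vars
-- ===== SOURCE A (Python) =====
-- from typing import List, Optional, Tuple, Union
--
-- def _make_vars(tables: List[Tuple[str, str]]) -> dict:
--     """Assign short distinct variable names per alias."""
--     used, mapping = set(), {}
--     for _, alias in tables:
--         base = alias[0].lower()
--         v = base
--         n = 2
--         while v in used:
--             v = f"{base}{n}"; n += 1
--         used.add(v); mapping[alias] = v
--     return mapping
-- ===== SOURCE B (Python) =====
-- def _make_vars(tables):
--     """Assign short distinct variable names per alias, via a per-letter counter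
--     (no used-set, no probe loop): the i-th alias whose lowercased first letter
--     is b gets b, b2, b3, ... in order."""
--     counts, mapping = {}, {}
--     for _, alias in tables:
--         base = alias[0].lower()
--         c = counts.get(base, 0)
--         mapping[alias] = base if c == 0 else f"{base}{c + 1}"
--         counts[base] = c + 1
--     return mapping
-- ===== Notes on version B (the rewrite author's own statement) =====
-- stated objective: faster
-- what changed: Replaces A's used-set plus inner while-probe (try base, base2, base3, ... until unused) by a single pass that keeps one counter per lowercased first letter and emits the name for the current count directly, so the inner scan disappears.
import Mathlib
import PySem

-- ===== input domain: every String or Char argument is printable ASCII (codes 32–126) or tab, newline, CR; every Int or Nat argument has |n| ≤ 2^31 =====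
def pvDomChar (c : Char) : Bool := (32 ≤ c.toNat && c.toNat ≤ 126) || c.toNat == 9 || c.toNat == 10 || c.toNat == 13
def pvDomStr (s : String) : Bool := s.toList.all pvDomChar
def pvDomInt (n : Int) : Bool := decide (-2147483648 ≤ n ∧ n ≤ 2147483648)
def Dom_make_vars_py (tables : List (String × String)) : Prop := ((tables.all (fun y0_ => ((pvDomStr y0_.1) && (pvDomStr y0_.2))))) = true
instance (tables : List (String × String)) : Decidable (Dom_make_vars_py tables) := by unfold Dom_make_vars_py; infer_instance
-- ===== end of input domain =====

-- B replaces A's used-set + inner while-probe by one counter per lowercased first letter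
-- (objective: the inner candidate scan disappears; same results).

-- ===== PORT A =====
-- A's 'while v in used: v = f"{base}{n}"; n += 1' loop; the fuel (used.length + 1) is a
-- termination bound only: the candidates are distinct, so at most used.length iterations run
def make_vars_py_probe (used : PySem.Set String) (base : String) : Nat → String → Int → String
  | 0, v, _ => v
  | fuel+1, v, n =>
    if PySem.Set.contains used v then
      make_vars_py_probe used base fuel (base ++ PySem.Int.toStr n) (n + 1)
    else v

-- one iteration of A's 'for _, alias in tables' loop; alias[0].lower() is ported exactly:
-- PySem.Str.pyGet? models alias[0] as a Char, lowerChar is .lower() of a 1-char string;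
-- the .getD ' ' default is unreachable under Pre_ (aliases are nonempty)
def make_vars_py_step (st : PySem.Set String × PySem.Dict String String) (t : String × String) :
    PySem.Set String × PySem.Dict String String :=
  let base := String.ofList [PySem.Chars.lowerChar ((PySem.Str.pyGet? t.2 0).getD ' ')]
  let v := make_vars_py_probe st.1 base (st.1.length + 1) base 2
  (PySem.Set.add st.1 v, st.2.insert t.2 v)


def make_vars_py (tables : List (String × String)) : List (String × String) :=
  ((tables.foldl make_vars_py_step (PySem.Set.empty, PySem.Dict.empty)).2).items

-- ===== PORT B =====
-- one iteration of B's loop: look up the counter for the lowercased first letter, emit the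
-- name for the current count, bump the counter
def make_vars_py_alt_step (st : PySem.Dict String Int × PySem.Dict String String) (t : String × String) :
    PySem.Dict String Int × PySem.Dict String String :=
  let base := String.ofList [PySem.Chars.lowerChar ((PySem.Str.pyGet? t.2 0).getD ' ')]
  let c := st.1.getD base 0
  let v := if c == 0 then base else base ++ PySem.Int.toStr (c + 1)
  (st.1.insert base (c + 1), st.2.insert t.2 v)


def make_vars_py_alt (tables : List (String × String)) : List (String × String) :=
  ((tables.foldl make_vars_py_alt_step (PySem.Dict.empty, PySem.Dict.empty)).2).items

-- ===== PRECONDITION & SPEC =====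
-- Pre_ excludes tables containing an empty alias, on which A raises IndexError at alias[0]
def Pre_make_vars_py (tables : List (String × String)) : Prop :=
  ∀ p ∈ tables, p.2 ≠ ""
instance (tables : List (String × String)) : Decidable (Pre_make_vars_py tables) := by
  unfold Pre_make_vars_py; infer_instance

def pvWitness_make_vars_py : (List (String × String)) :=
  [("users", "u"), ("orders", "o"), ("units", "U")]

def Spec_make_vars_py (tables : List (String × String)) (out : List (String × String)) : Prop :=
  out = make_vars_py_alt tables
instance (tables : List (String × String)) (out : List (String × String)) :
    Decidable (Spec_make_vars_py tables out) := by unfold Spec_make_vars_py; infer_instance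

-- ===== CLAIM (what is proved, stated in full; the proofs are below) =====
def Claim_equal_make_vars_py : Prop :=
  ∀ (tables : List (String × String)), Dom_make_vars_py tables → Pre_make_vars_py tables →
    Spec_make_vars_py tables (make_vars_py tables)

-- ===== LEMMAS AND PROOFS =====

-- the canonical name handed to the (k+1)-st alias whose lowercased first letter is b
def pvName (b : Char) (k : Nat) : String :=
  if k = 0 then String.ofList [b] else String.ofList [b] ++ PySem.Int.toStr ((k : Int) + 1)

theorem pv_toDigitsCore_eq (b : Nat) (hb : 1 < b) :
    ∀ (fuel n : Nat) (ds : List Char), 0 < n → n < fuel →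
      Nat.toDigitsCore b fuel n ds = ((Nat.digits b n).map Nat.digitChar).reverse ++ ds := by
  intro fuel
  induction fuel with
  | zero => intro n ds _ h; omega
  | succ fuel ih =>
    intro n ds hn hlt
    rw [Nat.toDigitsCore]
    rw [Nat.digits_def' hb hn]
    by_cases h0 : n / b = 0
    · simp [h0]
    · simp only [h0, if_false]
      rw [ih (n / b) _ (Nat.pos_of_ne_zero h0) (by have := Nat.div_lt_self hn hb; omega)]
      simp

theorem pv_toDigits_ne_nil (n : Nat) (hn : 0 < n) : Nat.toDigits 10 n ≠ [] := by
  unfold Nat.toDigits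
  rw [pv_toDigitsCore_eq 10 (by norm_num) _ n [] hn (by omega)]
  simp [Nat.digits_ne_nil_iff_ne_zero, hn.ne']

theorem pv_digitChar_inj : ∀ d < 16, ∀ d' < 16, Nat.digitChar d = Nat.digitChar d' → d = d' := by decide

theorem pv_map_digitChar_inj : ∀ (l1 l2 : List Nat), (∀ x ∈ l1, x < 16) → (∀ x ∈ l2, x < 16) →
    l1.map Nat.digitChar = l2.map Nat.digitChar → l1 = l2 := by
  intro l1
  induction l1 with
  | nil => intro l2 _ _ h; cases l2 <;> simp_all
  | cons x t ih =>
    intro l2 h1 h2 h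
    cases l2 with
    | nil => simp_all
    | cons y t2 =>
      simp only [List.map_cons, List.cons.injEq] at h
      have hx := pv_digitChar_inj x (h1 x (by simp)) y (h2 y (by simp)) h.1
      have := ih t2 (fun z hz => h1 z (by simp [hz])) (fun z hz => h2 z (by simp [hz])) h.2
      simp [hx, this]

theorem pv_toDigits_pos_inj (m n : Nat) (hm : 0 < m) (hn : 0 < n)
    (h : Nat.toDigits 10 m = Nat.toDigits 10 n) : m = n := by
  unfold Nat.toDigits at h
  rw [pv_toDigitsCore_eq 10 (by norm_num) _ m [] hm (by omega),
      pv_toDigitsCore_eq 10 (by norm_num) _ n [] hn (by omega)] at h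
  simp only [List.append_nil, List.reverse_inj] at h
  have := pv_map_digitChar_inj _ _
    (fun x hx => lt_trans (Nat.digits_lt_base (by norm_num) hx) (by norm_num))
    (fun x hx => lt_trans (Nat.digits_lt_base (by norm_num) hx) (by norm_num)) h
  exact Nat.digits.injective 10 this

theorem pv_toChars_of_nonneg (i : Int) (h : 0 ≤ i) :
    PySem.Int.toChars i = Nat.toDigits 10 i.toNat := by
  simp [PySem.Int.toChars, Int.not_lt.mpr h]

theorem pvName_toList (b : Char) (k : Nat) :
    (pvName b k).toList = b :: (if k = 0 then [] else Nat.toDigits 10 (k + 1)) := by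
  unfold pvName
  by_cases hk : k = 0
  · simp [hk]
  · simp only [hk, if_false, String.toList_append, PySem.Int.toList_toStr]
    rw [pv_toChars_of_nonneg _ (by omega), show ((k : Int)+1).toNat = k+1 by omega]
    simp

theorem pvName_inj {b b' : Char} {k k' : Nat} (h : pvName b k = pvName b' k') :
    b = b' ∧ k = k' := by
  have h' := congrArg String.toList h
  rw [pvName_toList, pvName_toList] at h'
  simp only [List.cons.injEq] at h'
  refine ⟨h'.1, ?_⟩
  have ht := h'.2
  by_cases hk : k = 0 <;> by_cases hk' : k' = 0
  · omega
  · simp [hk, hk'] at ht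
    exact absurd ht (pv_toDigits_ne_nil (k'+1) (by omega))
  · simp [hk, hk'] at ht
    exact absurd ht (pv_toDigits_ne_nil (k+1) (by omega))
  · simp only [hk, hk', if_false] at ht
    have := pv_toDigits_pos_inj (k+1) (k'+1) (by omega) (by omega) ht
    omega

theorem pv_ofList_inj {x y : Char} (h : String.ofList [x] = String.ofList [y]) : x = y := by
  have := congrArg String.toList h; simpa using this

theorem pv_probe_spec (used : PySem.Set String) (b : Char) (c : Int) (hc : 0 ≤ c)
    (Hmem : ∀ k : Nat, pvName b k ∈ used ↔ (k : Int) < c) :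
    ∀ (fuel j : Nat), c.toNat ≤ j + fuel → j ≤ c.toNat →
      make_vars_py_probe used (String.ofList [b]) fuel (pvName b j) ((j : Int) + 2) =
        pvName b c.toNat := by
  intro fuel
  induction fuel with
  | zero =>
    intro j h1 h2
    have hj : j = c.toNat := by omega
    subst hj; rfl
  | succ fuel ih =>
    intro j h1 h2
    rw [make_vars_py_probe]
    by_cases hj : (j : Int) < c
    · have hmem : PySem.Set.contains used (pvName b j) = true := by
        rw [PySem.Set.contains_iff]; exact (Hmem j).2 hj
      rw [hmem]
      simp only [if_true]
      have hv : String.ofList [b] ++ PySem.Int.toStr ((j : Int) + 2) = pvName b (j + 1) := by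
        unfold pvName
        rw [if_neg (by omega)]
        have : ((j : Int) + 2) = (((j + 1 : Nat) : Int) + 1) := by push_cast; ring
        rw [this]
      have hn : (j : Int) + 2 + 1 = ((j + 1 : Nat) : Int) + 2 := by push_cast; ring
      rw [hv, hn]
      exact ih (j + 1) (by omega) (by omega)
    · have hmem : PySem.Set.contains used (pvName b j) = false := by
        rw [Bool.eq_false_iff, Ne, PySem.Set.contains_iff]
        intro hin
        exact hj ((Hmem j).1 hin)
      rw [hmem, if_neg (by simp)]
      have hj' : j = c.toNat := by omega
      rw [hj']

theorem pv_count_le (used : PySem.Set String) (b : Char) (c : Int)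
    (Hmem : ∀ k : Nat, pvName b k ∈ used ↔ (k : Int) < c) : c.toNat ≤ used.length := by
  have hinj : Function.Injective (pvName b) := fun k k' h => (pvName_inj h).2
  have hnodup : ((List.range c.toNat).map (pvName b)).Nodup := (List.nodup_range).map hinj
  have hsub : (List.range c.toNat).map (pvName b) ⊆ used := by
    intro s hs
    simp only [List.mem_map, List.mem_range] at hs
    obtain ⟨k, hk, rfl⟩ := hs
    exact (Hmem k).2 (by omega)
  have := (List.subperm_of_subset hnodup hsub).length_le
  simpa using this

theorem pv_fold (ts : List (String × String)) :
    ∀ (used : PySem.Set String) (counts : PySem.Dict String Int)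
      (m : PySem.Dict String String),
      used.Nodup →
      (∀ s : String, 0 ≤ counts.getD s 0) →
      (∀ s : String, s ∈ used ↔
        ∃ (b : Char) (k : Nat), (k : Int) < counts.getD (String.ofList [b]) 0 ∧ s = pvName b k) →
      (ts.foldl make_vars_py_step (used, m)).2 = (ts.foldl make_vars_py_alt_step (counts, m)).2 := by
  induction ts with
  | nil => intro used counts m _ _ _; rfl
  | cons t ts ih =>
    intro used counts m hnd hpos hmem
    rw [List.foldl_cons, List.foldl_cons]
    have hc : 0 ≤ counts.getD (String.ofList [PySem.Chars.lowerChar ((PySem.Str.pyGet? t.2 0).getD ' ')]) 0 := hpos _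
    generalize hbc : PySem.Chars.lowerChar ((PySem.Str.pyGet? t.2 0).getD ' ') = bc at *
    generalize hcd : counts.getD (String.ofList [bc]) 0 = c at *
    have Hmem : ∀ k : Nat, pvName bc k ∈ used ↔ (k : Int) < c := by
      intro k; constructor
      · intro hk
        obtain ⟨b', k', hk', he⟩ := (hmem _).1 hk
        obtain ⟨rfl, rfl⟩ := pvName_inj he
        rwa [hcd] at hk'
      · intro hk
        exact (hmem _).2 ⟨bc, k, by rwa [hcd], rfl⟩
    have hA : make_vars_py_step (used, m) t =
        (PySem.Set.add used (pvName bc c.toNat), m.insert t.2 (pvName bc c.toNat)) := by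
      show (PySem.Set.add used _, m.insert t.2 _) = _
      have h0 : String.ofList [bc] = pvName bc 0 := by simp [pvName]
      have h2 : (2 : Int) = ((0 : Nat) : Int) + 2 := by norm_num
      rw [hbc, h0]
      rw [show make_vars_py_probe used (pvName bc 0) (used.length + 1) (pvName bc 0) 2 =
            make_vars_py_probe used (String.ofList [bc]) (used.length + 1) (pvName bc 0) (((0:Nat):Int) + 2) by rw [← h0, ← h2]]
      rw [pv_probe_spec used bc c hc Hmem (used.length + 1) 0
        (by have := pv_count_le used bc c Hmem; omega) (by omega)]
    have hB : make_vars_py_alt_step (counts, m) t =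
        (counts.insert (String.ofList [bc]) (c + 1), m.insert t.2 (pvName bc c.toNat)) := by
      show (counts.insert _ _, m.insert t.2 _) = _
      rw [hbc, hcd]
      by_cases hc0 : c = 0
      · simp only [hc0, show ((0:Int) == 0) = true by decide, if_true]
        simp [pvName]
      · rw [show (c == 0) = false by simpa using hc0, if_neg (by simp)]
        have : pvName bc c.toNat = String.ofList [bc] ++ PySem.Int.toStr (c + 1) := by
          unfold pvName
          rw [if_neg (by omega), show ((c.toNat : Int) + 1) = c + 1 by omega]
        rw [this]
    rw [hA, hB]
    apply ih
    · exact PySem.Set.nodup_add used _ hnd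
    · intro s
      rw [PySem.Dict.getD_insert]
      split_ifs with hkey
      · omega
      · exact hpos s
    · intro s
      rw [PySem.Set.mem_add]
      constructor
      · rintro (hs | rfl)
        · obtain ⟨b', k', hk', rfl⟩ := (hmem _).1 hs
          refine ⟨b', k', ?_, rfl⟩
          rw [PySem.Dict.getD_insert]
          split_ifs with hkey
          · have : b' = bc := pv_ofList_inj hkey
            subst this
            rw [hcd] at hk'
            omega
          · exact hk'
        · refine ⟨bc, c.toNat, ?_, rfl⟩
          rw [PySem.Dict.getD_insert, if_pos rfl]
          omega
      · rintro ⟨b', k', hk', rfl⟩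
        rw [PySem.Dict.getD_insert] at hk'
        split_ifs at hk' with hkey
        · have hb : b' = bc := pv_ofList_inj hkey
          subst hb
          by_cases hlt : (k' : Int) < c
          · exact Or.inl ((hmem _).2 ⟨b', k', by rwa [hcd], rfl⟩)
          · have : k' = c.toNat := by omega
            subst this
            exact Or.inr rfl
        · exact Or.inl ((hmem _).2 ⟨b', k', hk', rfl⟩)

-- ===== VERDICT (by name: the statement is the Claim_ definition above) =====
theorem make_vars_py_spec : Claim_equal_make_vars_py := by
  intro tables _hDom _hPre
  unfold Spec_make_vars_py make_vars_py make_vars_py_alt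
  exact congrArg PySem.Dict.items (pv_fold tables PySem.Set.empty PySem.Dict.empty PySem.Dict.empty
    (by simp [PySem.Set.empty]) (by simp) (by simp [PySem.Set.empty]))
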